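-- pv_equiv track=rewrite | github.com/ShiloShtral/homework-bank-app---15.08.24 | main.py | count_divisors_in_tuple
-- ===== SOURCE A (Python) =====
-- def count_divisors_in_tuple(n: int, t: tuple[int]) -> int:
--     def find_divisors(num: int) -> set[int]:
--         divisors = set()
--         for i in range(1, num + 1):
--             if num % i == 0:
--                 divisors.add(i)
--         return divisors
--
--     divisors = find_divisors(n)
--     count = 0
--     for element in t:
--         if element in divisors:
--             count += 1
--     return count
-- ===== SOURCE B (Python) =====
-- def count_divisors_in_tuple(n: int, t: tuple[int]) -> int:
--     # One pass over t: e divides n iff 1 <= e <= n and n % e == 0.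
--     # No precomputation of the divisor set.
--     return sum(1 for e in t if 1 <= e <= n and n % e == 0)
-- ===== Notes on version B (the rewrite author's own statement) =====
-- stated objective: alternative
-- what changed: B drops A's precomputation of the full divisor set (a loop over 1..n) and instead tests each tuple element directly (1 <= e <= n and n % e == 0) in a single pass over t.
import Mathlib
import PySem

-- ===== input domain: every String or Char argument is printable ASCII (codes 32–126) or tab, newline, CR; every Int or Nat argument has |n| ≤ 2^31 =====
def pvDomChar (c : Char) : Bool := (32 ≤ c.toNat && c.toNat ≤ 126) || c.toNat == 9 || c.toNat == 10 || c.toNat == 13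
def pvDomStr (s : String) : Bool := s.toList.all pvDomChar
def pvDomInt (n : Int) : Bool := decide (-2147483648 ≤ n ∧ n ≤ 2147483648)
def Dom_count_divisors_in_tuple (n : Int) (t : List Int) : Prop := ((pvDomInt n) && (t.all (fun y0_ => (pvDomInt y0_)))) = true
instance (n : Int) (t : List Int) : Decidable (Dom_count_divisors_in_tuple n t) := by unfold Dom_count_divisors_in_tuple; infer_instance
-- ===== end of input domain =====

-- B replaces A's precomputed divisor set by a direct per-element divisibility
-- test in one pass over t (alternative algorithm; no speed claim).

-- ===== PORT A =====
def find_divisors (num : Int) : PySem.Set Int :=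
  (PySem.List.pyRange 1 (num + 1) 1).foldl
    (fun s i => if PySem.Int.mod num i = 0 then PySem.Set.add s i else s)
    PySem.Set.empty

def count_divisors_in_tuple (n : Int) (t : List Int) : Int :=
  t.foldl (fun count element => if element ∈ find_divisors n then count + 1 else count) 0

-- ===== PORT B =====
def count_divisors_in_tuple_alt (n : Int) (t : List Int) : Int :=
  (t.filter (fun e => 1 ≤ e && e ≤ n && PySem.Int.mod n e = 0)).map (fun _ => (1 : Int)) |>.sum

-- ===== PRECONDITION & SPEC =====
def Spec_count_divisors_in_tuple (n : Int) (t : List Int) (out : Int) : Prop := out = count_divisors_in_tuple_alt n t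
instance (n : Int) (t : List Int) (out : Int) : Decidable (Spec_count_divisors_in_tuple n t out) := by unfold Spec_count_divisors_in_tuple; infer_instance

-- ===== CLAIM (what is proved, stated in full; the proofs are below) =====
def Claim_equal_count_divisors_in_tuple : Prop := ∀ (n : Int) (t : List Int), Dom_count_divisors_in_tuple n t → Spec_count_divisors_in_tuple n t (count_divisors_in_tuple n t)

-- ===== LEMMAS AND PROOFS =====

-- membership in the set built by A's filtered fold of Set.add
theorem mem_foldl_add_if {p : Int → Prop} [DecidablePred p] (l : List Int) (s : PySem.Set Int) (x : Int) :
    (x ∈ l.foldl (fun s i => if p i then PySem.Set.add s i else s) s) ↔ x ∈ s ∨ (x ∈ l ∧ p x) := by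
  induction l generalizing s with
  | nil => simp
  | cons a l ih =>
    simp only [List.foldl_cons, ih]
    by_cases h : p a
    · simp [h, PySem.Set.mem_add]
      constructor
      · rintro ((h1 | rfl) | ⟨h1, h2⟩)
        · exact Or.inl h1
        · exact Or.inr ⟨Or.inl rfl, h⟩
        · exact Or.inr ⟨Or.inr h1, h2⟩
      · rintro (h1 | ⟨(rfl | h1), h2⟩)
        · exact Or.inl (Or.inl h1)
        · exact Or.inl (Or.inr rfl)
        · exact Or.inr ⟨h1, h2⟩
    · simp [h]
      constructor
      · rintro (h1 | ⟨h1, h2⟩)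
        · exact Or.inl h1
        · exact Or.inr ⟨Or.inr h1, h2⟩
      · rintro (h1 | ⟨(rfl | h1), h2⟩)
        · exact Or.inl h1
        · exact absurd h2 h
        · exact Or.inr ⟨h1, h2⟩

theorem mem_divisors_iff (n x : Int) :
    (x ∈ (PySem.List.pyRange 1 (n + 1) 1).foldl
        (fun s i => if PySem.Int.mod n i = 0 then PySem.Set.add s i else s) PySem.Set.empty)
      ↔ (1 ≤ x ∧ x ≤ n ∧ PySem.Int.mod n x = 0) := by
  rw [mem_foldl_add_if]
  simp [PySem.Set.empty, PySem.List.mem_pyRange_one]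
  omega

-- B's count as a fold with the same shape as A's counting loop
theorem sum_filter_eq_foldl (q : Int → Bool) (t : List Int) (c : Int) :
    c + ((t.filter q).map (fun _ => (1 : Int))).sum
      = t.foldl (fun count e => if q e then count + 1 else count) c := by
  induction t generalizing c with
  | nil => simp
  | cons a t ih =>
    simp only [List.filter_cons, List.foldl_cons]
    by_cases h : q a = true
    · rw [if_pos h, if_pos h, ← ih]
      simp only [List.map_cons, List.sum_cons]
      omega
    · rw [if_neg h, if_neg h, ← ih]

-- ===== VERDICT (by name: the statement is the Claim_ definition above) =====
theorem count_divisors_in_tuple_spec : Claim_equal_count_divisors_in_tuple := by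
  intro n t _
  unfold Spec_count_divisors_in_tuple count_divisors_in_tuple count_divisors_in_tuple_alt find_divisors
  rw [← zero_add ((List.map _ _).sum), sum_filter_eq_foldl]
  congr 1
  funext count element
  by_cases h : (1 ≤ element ∧ element ≤ n ∧ PySem.Int.mod n element = 0)
  · rw [if_pos ((mem_divisors_iff n element).mpr h),
      if_pos (by simpa [Bool.and_eq_true, and_assoc] using h)]
  · rw [if_neg (fun hm => h ((mem_divisors_iff n element).mp hm)),
      if_neg (by simpa [Bool.and_eq_true, and_assoc] using h)]
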